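-- pv_equiv track=rewrite | github.com/BoyangL1/Advanced_DeepIRL | traj_policy_logll.py | trajFromPolicyFile
-- ===== SOURCE A (Python) =====
-- dirs = {0: 1, 1: -1, 2: -357, 3: 357, 4: 0}
--
-- def trajFromPolicyFile(policys, fnid_idx, start_fnid, traj_len):
--     traj = [start_fnid]
--     start_fnid_idx = fnid_idx[start_fnid]
--
--     for i in range(traj_len):
--         this_action = policys[start_fnid_idx]
--         this_fnid = start_fnid+dirs[this_action]
--         traj.append(this_fnid)
--         start_fnid = this_fnid
--     return traj
-- ===== SOURCE B (Python) =====
-- dirs = {0: 1, 1: -1, 2: -357, 3: 357, 4: 0}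
--
--
-- def trajFromPolicyFile(policys, fnid_idx, start_fnid, traj_len):
--     idx = fnid_idx[start_fnid]
--     if traj_len <= 0:
--         return [start_fnid]
--     d = dirs[policys[idx]]
--     return [start_fnid + i * d for i in range(traj_len + 1)]
-- ===== Notes on version B (the rewrite author's own statement) =====
-- stated objective: simpler
-- what changed: The per-step state-update loop is replaced by a closed-form arithmetic progression: since the policy index is computed once, the step is a constant d, so B looks up d once and returns [start_fnid + i*d for i in range(traj_len+1)].
import Mathlib
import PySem

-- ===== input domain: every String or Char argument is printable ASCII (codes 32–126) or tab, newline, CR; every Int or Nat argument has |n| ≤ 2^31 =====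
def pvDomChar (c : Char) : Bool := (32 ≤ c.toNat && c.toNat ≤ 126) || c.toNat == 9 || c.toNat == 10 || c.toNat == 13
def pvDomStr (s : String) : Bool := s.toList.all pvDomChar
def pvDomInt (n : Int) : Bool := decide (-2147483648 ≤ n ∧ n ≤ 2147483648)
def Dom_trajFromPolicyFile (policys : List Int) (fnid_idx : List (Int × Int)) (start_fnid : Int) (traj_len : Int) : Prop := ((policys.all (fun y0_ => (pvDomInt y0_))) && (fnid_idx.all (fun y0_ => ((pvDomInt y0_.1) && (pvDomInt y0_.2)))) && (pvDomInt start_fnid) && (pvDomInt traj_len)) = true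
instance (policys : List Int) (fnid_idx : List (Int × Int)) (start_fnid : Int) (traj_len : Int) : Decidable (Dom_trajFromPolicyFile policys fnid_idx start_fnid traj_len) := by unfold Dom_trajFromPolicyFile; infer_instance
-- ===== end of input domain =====

-- B replaces A's step-by-step state-update loop by a single lookup of the constant step d
-- and the closed-form arithmetic progression [start_fnid + i*d for i in range(traj_len+1)] (objective: simpler).

-- module-level constant `dirs = {0: 1, 1: -1, 2: -357, 3: 357, 4: 0}` shared by both sources
def pvDirs : List (Int × Int) := [(0, 1), (1, -1), (2, -357), (3, 357), (4, 0)]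

-- ===== PORT A =====
def trajFromPolicyFile (policys : List Int) (fnid_idx : List (Int × Int)) (start_fnid : Int) (traj_len : Int) : List Int :=
  -- traj = [start_fnid]; start_fnid_idx = fnid_idx[start_fnid]  (KeyError excluded by Pre_)
  let start_fnid_idx : Int := (PySem.Dict.get? (PySem.Dict.ofList fnid_idx) start_fnid).getD 0
  -- for i in range(traj_len): …  (IndexError/KeyError inside the loop excluded by Pre_)
  ((PySem.List.pyRange 0 traj_len 1).foldl
    (fun (s : List Int × Int) _ =>
      let this_action : Int := (PySem.List.pyGet? policys start_fnid_idx).getD 0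
      let this_fnid : Int := s.2 + (PySem.Dict.get? (PySem.Dict.ofList pvDirs) this_action).getD 0
      (s.1 ++ [this_fnid], this_fnid))
    ([start_fnid], start_fnid)).1

-- ===== PORT B =====
def trajFromPolicyFile_alt (policys : List Int) (fnid_idx : List (Int × Int)) (start_fnid : Int) (traj_len : Int) : List Int :=
  let idx : Int := (PySem.Dict.get? (PySem.Dict.ofList fnid_idx) start_fnid).getD 0
  if traj_len ≤ 0 then [start_fnid]
  else
    let d : Int := (PySem.Dict.get? (PySem.Dict.ofList pvDirs) ((PySem.List.pyGet? policys idx).getD 0)).getD 0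
    (PySem.List.pyRange 0 (traj_len + 1) 1).map (fun i => start_fnid + i * d)

-- ===== PRECONDITION & SPEC =====
-- Pre_ excludes exactly the inputs on which the Python A raises: start_fnid not a key of
-- fnid_idx (KeyError), and, when the loop runs at least once (0 < traj_len), a policy index
-- out of Python list range (IndexError) or an action outside the keys 0..4 of dirs (KeyError).
def Pre_trajFromPolicyFile (policys : List Int) (fnid_idx : List (Int × Int)) (start_fnid : Int) (traj_len : Int) : Prop :=
  (PySem.Dict.get? (PySem.Dict.ofList fnid_idx) start_fnid).isSome = true ∧
  (0 < traj_len →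
    (PySem.List.pyGet? policys ((PySem.Dict.get? (PySem.Dict.ofList fnid_idx) start_fnid).getD 0)).isSome = true ∧
    0 ≤ (PySem.List.pyGet? policys ((PySem.Dict.get? (PySem.Dict.ofList fnid_idx) start_fnid).getD 0)).getD 0 ∧
    (PySem.List.pyGet? policys ((PySem.Dict.get? (PySem.Dict.ofList fnid_idx) start_fnid).getD 0)).getD 0 ≤ 4)
instance (policys : List Int) (fnid_idx : List (Int × Int)) (start_fnid : Int) (traj_len : Int) : Decidable (Pre_trajFromPolicyFile policys fnid_idx start_fnid traj_len) := by unfold Pre_trajFromPolicyFile; infer_instance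

def pvWitness_trajFromPolicyFile : List Int × (List (Int × Int)) × Int × Int := ([3, 0], [(5, 1)], 5, 2)

def Spec_trajFromPolicyFile (policys : List Int) (fnid_idx : List (Int × Int)) (start_fnid : Int) (traj_len : Int) (out : List Int) : Prop := out = trajFromPolicyFile_alt policys fnid_idx start_fnid traj_len
instance (policys : List Int) (fnid_idx : List (Int × Int)) (start_fnid : Int) (traj_len : Int) (out : List Int) : Decidable (Spec_trajFromPolicyFile policys fnid_idx start_fnid traj_len out) := by unfold Spec_trajFromPolicyFile; infer_instance

-- ===== CLAIM (what is proved, stated in full; the proofs are below) =====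
def Claim_equal_trajFromPolicyFile : Prop := ∀ (policys : List Int) (fnid_idx : List (Int × Int)) (start_fnid : Int) (traj_len : Int), Dom_trajFromPolicyFile policys fnid_idx start_fnid traj_len → Pre_trajFromPolicyFile policys fnid_idx start_fnid traj_len → Spec_trajFromPolicyFile policys fnid_idx start_fnid traj_len (trajFromPolicyFile policys fnid_idx start_fnid traj_len)

-- ===== LEMMAS AND PROOFS =====

-- A's loop with the constant step d, run once per element of any list, in closed form.
lemma pvLoopA {β : Type} (d : Int) (L : List β) (l : List Int) (x : Int) :
    L.foldl (fun (s : List Int × Int) _ => (s.1 ++ [s.2 + d], s.2 + d)) (l, x)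
      = (l ++ (List.range L.length).map (fun i : Nat => x + ((i : Int) + 1) * d),
         x + (L.length : Int) * d) := by
  induction L generalizing l x with
  | nil => simp
  | cons b L ih =>
    simp only [List.foldl_cons, ih, List.length_cons, Prod.mk.injEq]
    refine ⟨?_, by push_cast; ring⟩
    rw [List.append_assoc, List.range_succ_eq_map]
    congr 1
    simp only [List.map_cons, List.map_map, Function.comp_def, List.singleton_append]
    congr 1
    · ring
    · apply List.map_congr_left
      intro i _
      push_cast
      ring

-- the arithmetic progression, peeled at the front
lemma pvProg (x d : Int) (n : Nat) :
    x :: (List.range n).map (fun i : Nat => x + ((i : Int) + 1) * d)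
      = (List.range (n + 1)).map (fun k : Nat => x + (k : Int) * d) := by
  rw [List.range_succ_eq_map]
  simp only [List.map_cons, List.map_map, Function.comp_def]
  refine List.cons_eq_cons.mpr ⟨by simp, ?_⟩
  apply List.map_congr_left
  intro i _
  push_cast
  ring

-- ===== VERDICT (by name: the statement is the Claim_ definition above) =====
theorem trajFromPolicyFile_spec : Claim_equal_trajFromPolicyFile := by
  intro policys fnid_idx start_fnid traj_len _ _
  unfold Spec_trajFromPolicyFile trajFromPolicyFile trajFromPolicyFile_alt
  by_cases h : traj_len ≤ 0
  · have he : PySem.List.pyRange 0 traj_len 1 = [] := by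
      simp [PySem.List.pyRange, h]
    simp [he, h]
  · simp only [if_neg h]
    obtain ⟨n, hn⟩ : ∃ n : Nat, traj_len = (n : Int) :=
      ⟨traj_len.toNat, (Int.toNat_of_nonneg (by omega)).symm⟩
    subst hn
    rw [pvLoopA]
    have hlen : (PySem.List.pyRange 0 (n : Int) 1).length = n := by
      rw [PySem.List.pyRange_zero_natCast]; simp
    have hr : ((n : Int) + 1) = ((n + 1 : Nat) : Int) := by push_cast; ring
    rw [hlen, hr, PySem.List.pyRange_zero_natCast, List.map_map]
    simp only [Function.comp_def, List.singleton_append]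
    exact pvProg _ _ _
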